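-- pv_equiv track=rewrite | github.com/xcarpentier/trypy | docstring/formation_python/mot_de_passe.py | contains_letter
-- ===== SOURCE A (Python) =====
-- LETTERS = [
--     "a",
--     "b",
--     "c",
--     "d",
--     "e",
--     "f",
--     "g",
--     "h",
--     "i",
--     "j",
--     "k",
--     "l",
--     "m",
--     "n",
--     "o",
--     "p",
--     "q",
--     "r",
--     "s",
--     "t",
--     "u",
--     "v",
--     "w",
--     "x",
--     "y",
--     "z",
-- ]
--
-- def contains_letter(password: str) -> bool:
--     contains_letter = False
--     for letter in LETTERS:
--         if letter in password:
--             contains_letter = True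
--             break
--         else:
--             continue
--     if contains_letter:
--         return True
--     else:
--         return False
-- ===== SOURCE B (Python) =====
-- def contains_letter(password: str) -> bool:
--     return any('a' <= c <= 'z' for c in password)
-- ===== Notes on version B (the rewrite author's own statement) =====
-- stated objective: idiomatic
-- what changed: Single any() pass over the password characters testing each against the lowercase ASCII range, instead of scanning the 26-letter alphabet list with a substring test, an accumulator and break.
import Mathlib
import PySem

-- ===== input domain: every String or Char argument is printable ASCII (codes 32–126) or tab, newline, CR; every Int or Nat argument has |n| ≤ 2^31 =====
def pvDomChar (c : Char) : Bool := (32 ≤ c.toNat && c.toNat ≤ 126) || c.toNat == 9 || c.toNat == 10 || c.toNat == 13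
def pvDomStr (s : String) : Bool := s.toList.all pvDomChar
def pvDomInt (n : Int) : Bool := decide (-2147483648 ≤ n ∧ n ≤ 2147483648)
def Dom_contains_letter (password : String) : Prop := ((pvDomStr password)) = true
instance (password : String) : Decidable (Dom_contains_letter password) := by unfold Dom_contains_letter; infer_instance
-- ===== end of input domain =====

-- ===== PORT A =====
-- B is a single pass over the password (range test 'a'..'z') instead of A's scan of the 26-letter alphabet with substring tests; equivalence is about the return value (A performs no mutation).
def pvLETTERS : List String := ["a", "b", "c", "d", "e", "f", "g", "h", "i", "j", "k", "l", "m", "n", "o", "p", "q", "r", "s", "t", "u", "v", "w", "x", "y", "z"]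

-- A's for-loop over LETTERS with break: returns on the first letter found, else falls through with the accumulator
def pvLettersLoop (letters : List String) (password : String) (acc : Bool) : Bool :=
  match letters with
  | [] => acc
  | l :: rest => if PySem.Str.isIn l password then true else pvLettersLoop rest password acc

def contains_letter (password : String) : Bool :=
  let contains := pvLettersLoop pvLETTERS password false
  if contains then true else false

-- ===== PORT B =====
def contains_letter_alt (password : String) : Bool :=
  password.toList.any (fun c => decide ('a' ≤ c) && decide (c ≤ 'z'))


-- ===== PRECONDITION & SPEC =====
def Spec_contains_letter (password : String) (out : Bool) : Prop := out = contains_letter_alt password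
instance (password : String) (out : Bool) : Decidable (Spec_contains_letter password out) := by unfold Spec_contains_letter; infer_instance

-- ===== CLAIM (what is proved, stated in full; the proofs are below) =====
def Claim_equal_contains_letter : Prop := ∀ (password : String), Dom_contains_letter password → Spec_contains_letter password (contains_letter password)

-- ===== LEMMAS AND PROOFS =====

lemma pvLettersLoop_true_iff (letters : List String) (p : String) :
    pvLettersLoop letters p false = true ↔ ∃ l ∈ letters, PySem.Str.isIn l p = true := by
  induction letters with
  | nil => simp [pvLettersLoop]
  | cons l rest ih =>
    by_cases h : PySem.Str.isIn l p = true
    · rw [pvLettersLoop, if_pos h]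
      exact iff_of_true rfl ⟨l, List.mem_cons_self, h⟩
    · rw [pvLettersLoop, if_neg h, ih]
      constructor
      · rintro ⟨x, hx, hi⟩; exact ⟨x, List.mem_cons_of_mem _ hx, hi⟩
      · rintro ⟨x, hx, hi⟩
        refine ⟨x, (List.mem_cons.mp hx).resolve_left ?_, hi⟩
        rintro rfl; exact h hi

lemma pvContains_eq_loop (p : String) :
    contains_letter p = pvLettersLoop pvLETTERS p false := by
  unfold contains_letter
  cases h : pvLettersLoop pvLETTERS p false <;> rfl

lemma pvLETTERS_eq_map :
    pvLETTERS = (List.range 26).map (fun k => String.ofList [Char.ofNat (97 + k)]) := by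
  decide

lemma pvChar_toNat_bounds (c : Char) (h1 : 'a' ≤ c) (h2 : c ≤ 'z') :
    97 ≤ c.toNat ∧ c.toNat ≤ 122 := by
  simp only [Char.le_def, UInt32.le_iff_toNat_le] at h1 h2
  exact ⟨h1, h2⟩

lemma pvExists_letter_iff (p : String) :
    (∃ l ∈ pvLETTERS, PySem.Str.isIn l p = true) ↔
      ∃ c ∈ p.toList, 'a' ≤ c ∧ c ≤ 'z' := by
  constructor
  · rintro ⟨l, hl, hin⟩
    rw [pvLETTERS_eq_map] at hl
    rcases List.mem_map.mp hl with ⟨k, hk, rfl⟩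
    rw [PySem.Str.isIn_iff_infix] at hin
    simp only [String.toList_ofList] at hin
    have hmem := (List.singleton_infix_iff _ _).mp hin
    refine ⟨Char.ofNat (97 + k), hmem, ?_, ?_⟩ <;>
      · have hk' := List.mem_range.mp hk
        interval_cases k <;> decide
  · rintro ⟨c, hc, h1, h2⟩
    obtain ⟨hlo, hhi⟩ := pvChar_toNat_bounds c h1 h2
    refine ⟨String.ofList [c], ?_, ?_⟩
    · rw [pvLETTERS_eq_map]
      refine List.mem_map.mpr ⟨c.toNat - 97, List.mem_range.mpr (by omega), ?_⟩
      have : 97 + (c.toNat - 97) = c.toNat := by omega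
      rw [this, Char.ofNat_toNat]
    · rw [PySem.Str.isIn_iff_infix]
      simp only [String.toList_ofList]
      exact (List.singleton_infix_iff _ _).mpr hc

-- ===== VERDICT (by name: the statement is the Claim_ definition above) =====
theorem contains_letter_spec : Claim_equal_contains_letter := by
  intro password _
  unfold Spec_contains_letter contains_letter_alt
  rw [pvContains_eq_loop, Bool.eq_iff_iff, pvLettersLoop_true_iff,
    pvExists_letter_iff, List.any_eq_true]
  simp
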